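-- pv_equiv track=rewrite | github.com/Robertmonkey/Palmate | scripts/check_guides_bundle.py | _counter_differences
-- ===== SOURCE A (Python) =====
-- from collections import Counter
--
-- def _counter_differences(
--     baseline: Counter[str], current: Counter[str]
-- ) -> tuple[list[tuple[str, int]], list[tuple[str, int]]]:
--     """Return entries removed from and added to ``baseline`` relative to ``current``."""
--
--     removed: list[tuple[str, int]] = []
--     for key, count in baseline.items():
--         delta = count - current.get(key, 0)
--         if delta > 0:
--             removed.append((key, delta))
--
--     added: list[tuple[str, int]] = []
--     for key, count in current.items():
--         delta = count - baseline.get(key, 0)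
--         if delta > 0:
--             added.append((key, delta))
--
--     removed.sort(key=lambda item: item[0])
--     added.sort(key=lambda item: item[0])
--     return removed, added
-- ===== SOURCE B (Python) =====
-- def _counter_differences(baseline, current):
--     """Return entries removed from and added to ``baseline`` relative to ``current``."""
--
--     b = sorted(baseline.items(), key=lambda kv: kv[0])
--     c = sorted(current.items(), key=lambda kv: kv[0])
--     removed, added = [], []
--     i = j = 0
--     while i < len(b) and j < len(c):
--         kb, vb = b[i]
--         kc, vc = c[j]
--         if kb < kc:
--             if vb > 0:
--                 removed.append((kb, vb))
--             i += 1
--         elif kc < kb: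
--             if vc > 0:
--                 added.append((kc, vc))
--             j += 1
--         else:
--             d = vb - vc
--             if d > 0:
--                 removed.append((kb, d))
--             elif d < 0:
--                 added.append((kc, -d))
--             i += 1
--             j += 1
--     while i < len(b):
--         kb, vb = b[i]
--         if vb > 0:
--             removed.append((kb, vb))
--         i += 1
--     while j < len(c):
--         kc, vc = c[j]
--         if vc > 0:
--             added.append((kc, vc))
--         j += 1
--     return removed, added
-- ===== Notes on version B (the rewrite author's own statement) =====
-- stated objective: alternative
-- what changed: B sorts both item lists once and runs a single two-pointer merge that emits removed and added simultaneously from per-key deltas, replacing A's two dictionary-lookup filter loops followed by two post-hoc sorts.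
import Mathlib
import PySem

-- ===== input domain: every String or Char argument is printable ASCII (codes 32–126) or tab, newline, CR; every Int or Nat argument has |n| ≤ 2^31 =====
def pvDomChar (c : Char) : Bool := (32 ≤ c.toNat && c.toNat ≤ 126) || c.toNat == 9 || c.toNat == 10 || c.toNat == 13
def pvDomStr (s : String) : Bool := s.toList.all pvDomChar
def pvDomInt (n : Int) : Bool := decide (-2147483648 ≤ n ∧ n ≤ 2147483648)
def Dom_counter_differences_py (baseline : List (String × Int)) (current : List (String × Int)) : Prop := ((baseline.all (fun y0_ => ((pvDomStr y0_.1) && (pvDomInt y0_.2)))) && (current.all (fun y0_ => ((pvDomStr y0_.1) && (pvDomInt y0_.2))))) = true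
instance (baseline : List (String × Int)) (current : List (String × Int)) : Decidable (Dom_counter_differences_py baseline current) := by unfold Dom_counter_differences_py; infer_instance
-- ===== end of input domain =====

-- B sorts both item lists once and merges them with two pointers, emitting removed and added
-- in one simultaneous pass instead of A's two lookup-filter loops plus two post-hoc sorts
-- (objective: alternative algorithm, same asymptotic cost).


-- ===== PORT A =====
-- literal port of _counter_differences: two append loops over items, then sort each by key
def counter_differences_py (baseline : List (String × Int)) (current : List (String × Int)) : (List (String × Int)) × (List (String × Int)) :=
  let removed := baseline.foldl (fun acc kv =>
    let delta := kv.2 - (PySem.Dict.mk current).getD kv.1 0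
    if delta > 0 then acc ++ [(kv.1, delta)] else acc) []
  let added := current.foldl (fun acc kv =>
    let delta := kv.2 - (PySem.Dict.mk baseline).getD kv.1 0
    if delta > 0 then acc ++ [(kv.1, delta)] else acc) []
  (PySem.List.sorted removed (fun it => it.1),
   PySem.List.sorted added (fun it => it.1))

-- ===== PORT B =====
-- the while loops of Source B as structural recursion over the two sorted lists:
-- same state (remaining b-items, remaining c-items), same branch order
def pvMergeDiff : List (String × Int) → List (String × Int) → (List (String × Int)) × (List (String × Int))
  | [], [] => ([], [])
  | b :: bs, [] =>
    let r := pvMergeDiff bs []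
    (if b.2 > 0 then b :: r.1 else r.1, r.2)
  | [], c :: cs =>
    let r := pvMergeDiff [] cs
    (r.1, if c.2 > 0 then c :: r.2 else r.2)
  | b :: bs, c :: cs =>
    if b.1 < c.1 then
      let r := pvMergeDiff bs (c :: cs)
      (if b.2 > 0 then b :: r.1 else r.1, r.2)
    else if c.1 < b.1 then
      let r := pvMergeDiff (b :: bs) cs
      (r.1, if c.2 > 0 then c :: r.2 else r.2)
    else
      let d := b.2 - c.2
      let r := pvMergeDiff bs cs
      (if d > 0 then (b.1, d) :: r.1 else r.1,
       if d < 0 then (c.1, -d) :: r.2 else r.2)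

def counter_differences_py_alt (baseline : List (String × Int)) (current : List (String × Int)) : (List (String × Int)) × (List (String × Int)) :=
  pvMergeDiff (PySem.List.sorted baseline (fun kv => kv.1))
              (PySem.List.sorted current (fun kv => kv.1))

-- ===== PRECONDITION & SPEC =====
-- Pre_ excludes association lists with a repeated key: they do not represent any Python
-- dict/Counter (A's parameters), so A is never run on such an input.
def Pre_counter_differences_py (baseline : List (String × Int)) (current : List (String × Int)) : Prop :=
  (baseline.map Prod.fst).Nodup ∧ (current.map Prod.fst).Nodup
instance (baseline : List (String × Int)) (current : List (String × Int)) : Decidable (Pre_counter_differences_py baseline current) := by unfold Pre_counter_differences_py; infer_instance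

def pvWitness_counter_differences_py : (List (String × Int)) × (List (String × Int)) :=
  ([("a", 2), ("c", 1)], [("a", 1), ("b", 3)])

def Spec_counter_differences_py (baseline : List (String × Int)) (current : List (String × Int)) (out : (List (String × Int)) × (List (String × Int))) : Prop := out = counter_differences_py_alt baseline current
instance (baseline : List (String × Int)) (current : List (String × Int)) (out : (List (String × Int)) × (List (String × Int))) : Decidable (Spec_counter_differences_py baseline current out) := by unfold Spec_counter_differences_py; infer_instance

-- ===== CLAIM (what is proved, stated in full; the proofs are below) =====
def Claim_equal_counter_differences_py : Prop := ∀ (baseline : List (String × Int)) (current : List (String × Int)), Dom_counter_differences_py baseline current → Pre_counter_differences_py baseline current → Spec_counter_differences_py baseline current (counter_differences_py baseline current)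

-- ===== LEMMAS AND PROOFS =====

-- per-key lookup with default 0, as A's current.get(key, 0)
def pvLk (xs : List (String × Int)) (k : String) : Int := (PySem.Dict.mk xs).getD k 0
theorem pvLk_nil (k : String) : pvLk [] k = 0 := by
  simp [pvLk, PySem.Dict.getD_eq_get?_getD, PySem.Dict.get?]
theorem pvLk_cons (a : String × Int) (xs : List (String × Int)) (k : String) :
    pvLk (a :: xs) k = if a.1 = k then a.2 else pvLk xs k := by
  simp [pvLk, PySem.Dict.getD_eq_get?_getD]
  rw [show ({ items := a :: xs } : PySem.Dict String Int) = PySem.Dict.mk (a :: xs) from rfl,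
      PySem.Dict.get?_mk_cons]
  split_ifs with h h2 h2 <;> simp_all
theorem pvLk_not_mem (xs : List (String × Int)) (k : String)
    (h : k ∉ xs.map Prod.fst) : pvLk xs k = 0 := by
  induction xs with
  | nil => exact pvLk_nil k
  | cons a t ih =>
    simp at h
    rw [pvLk_cons, if_neg (fun he => h.1 he.symm)]
    exact ih (by simpa using fun x hx => h.2 x hx)

theorem pv_merge_spec (sb sc : List (String × Int))
    (hb : sb.Pairwise (fun a b => a.1 < b.1)) (hc : sc.Pairwise (fun a b => a.1 < b.1)) :
    pvMergeDiff sb sc =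
      ((sb.map (fun kv => (kv.1, kv.2 - pvLk sc kv.1))).filter (fun kv => decide (0 < kv.2)),
       (sc.map (fun kv => (kv.1, kv.2 - pvLk sb kv.1))).filter (fun kv => decide (0 < kv.2))) := by
  fun_induction pvMergeDiff sb sc with
  | case1 => simp
  | case2 b bs r ih =>
    rw [show r = _ from ih (hb.sublist (List.sublist_cons_self _ _)) hc]
    simp only [List.map_cons, List.map_nil, List.filter_cons, List.filter_nil, pvLk_nil]
    by_cases h : 0 < b.2 <;> simp [h]
  | case3 c cs r ih =>
    rw [show r = _ from ih hb (hc.sublist (List.sublist_cons_self _ _))]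
    simp only [List.map_cons, List.map_nil, List.filter_cons, List.filter_nil, pvLk_nil]
    by_cases h : 0 < c.2 <;> simp [h]
  | case4 b bs c cs hlt r ih =>
    have hckeys : ∀ kv ∈ c :: cs, b.1 < kv.1 := by
      intro kv hm
      rcases List.mem_cons.mp hm with h | h
      · exact h ▸ hlt
      · exact lt_trans hlt (List.rel_of_pairwise_cons hc h)
    have hlk0 : pvLk (c :: cs) b.1 = 0 := by
      apply pvLk_not_mem
      intro hmem
      obtain ⟨kv, hm, he⟩ := List.mem_map.mp hmem
      exact absurd (he ▸ hckeys kv hm) (lt_irrefl _)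
    have hmap2 : (c :: cs).map (fun kv => (kv.1, kv.2 - pvLk (b :: bs) kv.1))
        = (c :: cs).map (fun kv => (kv.1, kv.2 - pvLk bs kv.1)) := by
      apply List.map_congr_left
      intro kv hm
      rw [pvLk_cons, if_neg (fun he => absurd (he ▸ hckeys kv hm) (lt_irrefl _))]
    rw [show r = _ from ih (hb.sublist (List.sublist_cons_self _ _)) hc]
    simp only [List.map_cons, List.filter_cons, hlk0, hmap2, sub_zero]
    by_cases h : 0 < b.2 <;> simp [h]
  | case5 b bs c cs hlt hgt r ih =>
    have hbkeys : ∀ kv ∈ b :: bs, c.1 < kv.1 := by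
      intro kv hm
      rcases List.mem_cons.mp hm with h | h
      · exact h ▸ hgt
      · exact lt_trans hgt (List.rel_of_pairwise_cons hb h)
    have hlk0 : pvLk (b :: bs) c.1 = 0 := by
      apply pvLk_not_mem
      intro hmem
      obtain ⟨kv, hm, he⟩ := List.mem_map.mp hmem
      exact absurd (he ▸ hbkeys kv hm) (lt_irrefl _)
    have hmap1 : (b :: bs).map (fun kv => (kv.1, kv.2 - pvLk (c :: cs) kv.1))
        = (b :: bs).map (fun kv => (kv.1, kv.2 - pvLk cs kv.1)) := by
      apply List.map_congr_left
      intro kv hm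
      rw [pvLk_cons, if_neg (fun he => absurd (he ▸ hbkeys kv hm) (lt_irrefl _))]
    rw [show r = _ from ih hb (hc.sublist (List.sublist_cons_self _ _))]
    simp only [List.map_cons, List.filter_cons, hlk0, hmap1, sub_zero]
    by_cases h : 0 < c.2 <;> simp [h]
  | case6 b bs c cs hlt hgt d r ih =>
    have heq : b.1 = c.1 := le_antisymm (not_lt.mp hgt) (not_lt.mp hlt)
    have hmap1 : bs.map (fun kv => (kv.1, kv.2 - pvLk (c :: cs) kv.1))
        = bs.map (fun kv => (kv.1, kv.2 - pvLk cs kv.1)) := by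
      apply List.map_congr_left
      intro kv hm
      rw [pvLk_cons, if_neg (fun he => absurd (heq ▸ he ▸ List.rel_of_pairwise_cons hb hm) (lt_irrefl _))]
    have hmap2 : cs.map (fun kv => (kv.1, kv.2 - pvLk (b :: bs) kv.1))
        = cs.map (fun kv => (kv.1, kv.2 - pvLk bs kv.1)) := by
      apply List.map_congr_left
      intro kv hm
      rw [pvLk_cons, if_neg (fun he => absurd (heq ▸ he ▸ List.rel_of_pairwise_cons hc hm) (lt_irrefl _))]
    have hlkb : pvLk (c :: cs) b.1 = c.2 := by rw [pvLk_cons, if_pos heq.symm]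
    have hlkc : pvLk (b :: bs) c.1 = b.2 := by rw [pvLk_cons, if_pos heq]
    rw [show r = _ from ih (hb.sublist (List.sublist_cons_self _ _)) (hc.sublist (List.sublist_cons_self _ _))]
    simp only [List.map_cons, List.filter_cons, hmap1, hmap2, hlkb, hlkc, Prod.mk.injEq]
    constructor
    · simp [d]
    · by_cases h : 0 < c.2 - b.2
      · simp [d, show -(b.2 - c.2) = c.2 - b.2 by ring]
      · simp [d, show ¬ (b.2 - c.2 < 0) by omega]
        omega

theorem pvLk_perm (xs ys : List (String × Int)) (hperm : ys.Perm xs)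
    (hnd : (xs.map Prod.fst).Nodup) (k : String) : pvLk ys k = pvLk xs k := by
  by_cases hm : k ∈ xs.map Prod.fst
  · obtain ⟨kv, hkv, hk⟩ := List.mem_map.mp hm
    have hndy : (ys.map Prod.fst).Nodup := ((hperm.map Prod.fst).nodup_iff).mpr hnd
    have h1 : pvLk xs k = kv.2 := hk ▸ PySem.Dict.getD_of_mem_items (PySem.Dict.mk xs) hkv hnd 0
    have h2 : pvLk ys k = kv.2 :=
      hk ▸ PySem.Dict.getD_of_mem_items (PySem.Dict.mk ys) (hperm.mem_iff.mpr hkv) hndy 0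
    rw [h1, h2]
  · rw [pvLk_not_mem xs k hm,
        pvLk_not_mem ys k (fun h => hm ((hperm.map Prod.fst).mem_iff.mp h))]

theorem pv_sideA (src other : List (String × Int))
    (hs : (src.map Prod.fst).Nodup) (ho : (other.map Prod.fst).Nodup) :
    PySem.List.sorted
      (src.foldl (fun acc kv =>
        let delta := kv.2 - (PySem.Dict.mk other).getD kv.1 0
        if delta > 0 then acc ++ [(kv.1, delta)] else acc) [])
      (fun it => it.1)
    = ((PySem.List.sorted src (fun kv => kv.1)).map
        (fun kv => (kv.1, kv.2 - pvLk (PySem.List.sorted other (fun kv => kv.1)) kv.1))).filter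
        (fun kv => decide (0 < kv.2)) := by
  set g : (String × Int) → (String × Int) := fun kv => (kv.1, kv.2 - pvLk other kv.1) with hg
  set q : (String × Int) → Bool := fun kv => decide (0 < kv.2) with hq
  -- A's fold is filter-then-map
  have hA : (src.foldl (fun acc kv =>
        let delta := kv.2 - (PySem.Dict.mk other).getD kv.1 0
        if delta > 0 then acc ++ [(kv.1, delta)] else acc) [])
      = (src.map g).filter q := by
    rw [List.filter_map]
    simpa [hg, hq, Function.comp, pvLk] using
      PySem.List.foldl_append_if ((fun kv => decide (0 < kv.2)) ∘ g) g src []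
  -- lookups in sorted other = lookups in other
  have hlk : ∀ k, pvLk (PySem.List.sorted other (fun kv => kv.1)) k = pvLk other k :=
    fun k => pvLk_perm other _ (PySem.List.sorted_perm _ _ _) ho k
  have hrhs : ((PySem.List.sorted src (fun kv => kv.1)).map
        (fun kv => (kv.1, kv.2 - pvLk (PySem.List.sorted other (fun kv => kv.1)) kv.1))).filter q
      = ((PySem.List.sorted src (fun kv => kv.1)).map g).filter q := by
    simp only [hlk, hg]
  rw [hA, hrhs]
  -- sortedness of the target
  set ss := PySem.List.sorted src (fun kv => kv.1) with hss
  have hssperm : ss.Perm src := PySem.List.sorted_perm _ _ _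
  have hssnd : (ss.map Prod.fst).Nodup := ((hssperm.map Prod.fst).nodup_iff).mpr hs
  have hsslt : ss.Pairwise (fun a b => a.1 < b.1) := by
    have hle : ss.Pairwise (fun a b => a.1 ≤ b.1) := by
      simpa using PySem.List.sorted_pairwise (κ := String) src (fun kv => kv.1)
    have hne : ss.Pairwise (fun a b => a.1 ≠ b.1) := List.pairwise_map.mp hssnd
    exact (hle.and hne).imp (fun h => lt_of_le_of_ne h.1 h.2)
  apply PySem.List.sorted_eq_of_perm_of_pairwise_lt
  · exact (hssperm.map g).filter q
  · have h1 : (ss.map g).Pairwise (fun a b => a.1 < b.1) := by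
      rw [List.pairwise_map]
      exact hsslt.imp (fun h => by simpa [hg] using h)
    exact h1.filter q

-- keys of a nodup-keyed list, once sorted by key, are strictly increasing
theorem pv_sorted_lt (xs : List (String × Int)) (h : (xs.map Prod.fst).Nodup) :
    (PySem.List.sorted xs (fun kv => kv.1)).Pairwise (fun a b => a.1 < b.1) := by
  set ss := PySem.List.sorted xs (fun kv => kv.1) with hss
  have hssperm : ss.Perm xs := PySem.List.sorted_perm _ _ _
  have hssnd : (ss.map Prod.fst).Nodup := ((hssperm.map Prod.fst).nodup_iff).mpr h
  have hle : ss.Pairwise (fun a b => a.1 ≤ b.1) := by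
    simpa using PySem.List.sorted_pairwise (κ := String) xs (fun kv => kv.1)
  have hne : ss.Pairwise (fun a b => a.1 ≠ b.1) := List.pairwise_map.mp hssnd
  exact (hle.and hne).imp (fun h => lt_of_le_of_ne h.1 h.2)

-- ===== VERDICT (by name: the statement is the Claim_ definition above) =====
theorem counter_differences_py_spec : Claim_equal_counter_differences_py := by
  intro baseline current _ hpre
  unfold Spec_counter_differences_py counter_differences_py counter_differences_py_alt
  rw [pv_merge_spec _ _ (pv_sorted_lt baseline hpre.1) (pv_sorted_lt current hpre.2)]
  exact Prod.ext (pv_sideA baseline current hpre.1 hpre.2)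
               (pv_sideA current baseline hpre.2 hpre.1)
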